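-- pv_equiv track=rewrite | github.com/Ahemad7429/Problem-Solving | tgp/c1_level.py | findCurrency
-- ===== SOURCE A (Python) =====
-- def findCurrency(votes):
--     n = len(votes)
--     count = {}
--
--     # Count the occurrences of each denomination
--     for vote in votes:
--         if vote in count:
--             count[vote] += 1
--         else:
--             count[vote] = 1
--
--     released_denominations = []
--
--     # Check if each denomination received more than one vote
--     for denom, freq in count.items():
--         if freq > 1 and abs(denom) <= n:
--             released_denominations.append(abs(denom))
--
--     # Sort the released denominations in increasing order
--     released_denominations.sort()
--
--     return released_denominations
-- ===== SOURCE B (Python) =====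
-- def findCurrency(votes):
--     n = len(votes)
--     svotes = sorted(votes, key=lambda x: (abs(x), x))
--     released = []
--     i = 0
--     m = len(svotes)
--     while i < m:
--         j = i + 1
--         while j < m and svotes[j] == svotes[i]:
--             j += 1
--         if j - i > 1 and abs(svotes[i]) <= n:
--             released.append(abs(svotes[i]))
--         i = j
--     return released
-- ===== Notes on version B (the rewrite author's own statement) =====
-- stated objective: alternative
-- what changed: Replaced the frequency dictionary plus final sort by sorting the votes once with key (abs(x), x) and making a single linear pass that groups consecutive runs of equal values, emitting abs(value) for runs longer than one; the output comes out already in ascending order so no dictionary and no final sort of the result are needed.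
import Mathlib
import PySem

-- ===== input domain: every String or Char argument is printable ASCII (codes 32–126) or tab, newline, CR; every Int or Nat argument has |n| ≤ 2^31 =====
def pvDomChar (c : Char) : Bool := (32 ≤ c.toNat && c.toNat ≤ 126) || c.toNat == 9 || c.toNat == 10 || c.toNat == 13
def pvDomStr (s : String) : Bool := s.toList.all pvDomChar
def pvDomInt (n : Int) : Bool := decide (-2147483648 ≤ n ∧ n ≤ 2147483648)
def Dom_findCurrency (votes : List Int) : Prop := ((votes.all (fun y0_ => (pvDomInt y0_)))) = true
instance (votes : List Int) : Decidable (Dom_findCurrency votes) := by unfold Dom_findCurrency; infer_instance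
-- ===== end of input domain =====

-- B replaces A's frequency dictionary and final sort by one sort with key (abs x, x) and a single
-- run-grouping pass over the sorted list (objective: alternative algorithm of similar cost).

-- ===== PORT A =====
def findCurrency (votes : List Int) : List Int :=
  let n : Int := votes.length
  let count : PySem.Dict Int Int := votes.foldl (fun d vote =>
      match d.get? vote with
      | some c => d.insert vote (c + 1)      -- 'if vote in count: count[vote] += 1'
      | none => d.insert vote 1) PySem.Dict.empty
  let released : List Int := count.items.foldl (fun acc dv =>
      if 1 < dv.2 ∧ |dv.1| ≤ n then acc ++ [|dv.1|] else acc) []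
  PySem.List.sorted released (fun x => x) false   -- released.sort()

-- ===== PORT B =====
-- the run-grouping pass of Source B: strip the run of the head value, emit |head| if the run is longer than 1
def pvRuns (n : Int) : List Int → List Int
  | [] => []
  | x :: xs =>
    let same := xs.takeWhile (fun y => y == x)
    let rest := xs.dropWhile (fun y => y == x)
    (if 1 < 1 + (same.length : Int) ∧ |x| ≤ n then [|x|] else []) ++ pvRuns n rest
termination_by s => s.length
decreasing_by
  exact Nat.lt_succ_of_le (List.length_dropWhile_le _ _)

def findCurrency_alt (votes : List Int) : List Int :=
  let n : Int := votes.length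
  pvRuns n (PySem.List.sorted2 votes (fun x => |x|) (fun x => x) false)

-- ===== PRECONDITION & SPEC =====
def Spec_findCurrency (votes : List Int) (out : List Int) : Prop := out = findCurrency_alt votes
instance (votes : List Int) (out : List Int) : Decidable (Spec_findCurrency votes out) := by unfold Spec_findCurrency; infer_instance

-- ===== CLAIM (what is proved, stated in full; the proofs are below) =====
def Claim_equal_findCurrency : Prop := ∀ (votes : List Int), Dom_findCurrency votes → Spec_findCurrency votes (findCurrency votes)

-- ===== LEMMAS AND PROOFS =====

-- the non-strict order s is sorted in: lexicographic on (|x|, x)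
def pvRle (a b : Int) : Prop := |a| < |b| ∨ (|a| = |b| ∧ a ≤ b)

-- the Bool comparison sorted2 uses
def pvBefore (a b : Int) : Bool :=
  decide (|a| < |b|) || (!decide (|b| < |a|) && decide (a < b))

lemma pvBefore_iff (a b : Int) : pvBefore a b = true ↔ (|a| < |b| ∨ (|a| = |b| ∧ a < b)) := by
  unfold pvBefore
  rcases abs_cases a with ⟨ha, _⟩ | ⟨ha, _⟩ <;> rcases abs_cases b with ⟨hb, _⟩ | ⟨hb, _⟩ <;>
    simp [ha, hb] <;> omega

lemma pvNotBefore_iff (a b : Int) : pvBefore a b = false ↔ pvRle b a := by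
  unfold pvRle
  rw [← Bool.not_eq_true, pvBefore_iff]
  rcases abs_cases a with ⟨ha, _⟩ | ⟨ha, _⟩ <;> rcases abs_cases b with ⟨hb, _⟩ | ⟨hb, _⟩ <;>
    simp only [ha, hb] <;> omega

lemma pvRle_trans {a b c : Int} (h1 : pvRle a b) (h2 : pvRle b c) : pvRle a c := by
  unfold pvRle at *
  rcases abs_cases a with ⟨ha, _⟩ | ⟨ha, _⟩ <;> rcases abs_cases b with ⟨hb, _⟩ | ⟨hb, _⟩ <;>
    rcases abs_cases c with ⟨hc, _⟩ | ⟨hc, _⟩ <;> simp only [ha, hb, hc] at h1 h2 ⊢ <;> omega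

lemma pvRle_antisymm {a b : Int} (h1 : pvRle a b) (h2 : pvRle b a) : a = b := by
  unfold pvRle at *
  rcases abs_cases a with ⟨ha, _⟩ | ⟨ha, _⟩ <;> rcases abs_cases b with ⟨hb, _⟩ | ⟨hb, _⟩ <;>
    simp only [ha, hb] at h1 h2 ⊢ <;> omega

lemma pvBefore_Rle {a b : Int} (h : pvBefore a b = true) : pvRle a b := by
  rw [pvBefore_iff] at h
  unfold pvRle; rcases h with h | ⟨h1, h2⟩
  · exact Or.inl h
  · exact Or.inr ⟨h1, le_of_lt h2⟩

-- insertion into a pvRle-pairwise list keeps it pairwise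
lemma pvInsertBy_pairwise (x : Int) (ys : List Int) (h : ys.Pairwise pvRle) :
    (PySem.List.insertBy pvBefore x ys).Pairwise pvRle := by
  induction ys with
  | nil => simp [PySem.List.insertBy]
  | cons y ys ih =>
    rw [List.pairwise_cons] at h
    by_cases hb : pvBefore x y = true
    · rw [PySem.List.insertBy, if_pos hb]
      refine List.pairwise_cons.2 ⟨?_, List.pairwise_cons.2 ⟨h.1, h.2⟩⟩
      intro z hz
      rcases List.mem_cons.1 hz with rfl | hz
      · exact pvBefore_Rle hb
      · exact pvRle_trans (pvBefore_Rle hb) (h.1 z hz)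
    · rw [PySem.List.insertBy, if_neg hb]
      refine List.pairwise_cons.2 ⟨?_, ih h.2⟩
      intro z hz
      rcases (PySem.List.mem_insertBy pvBefore x z ys).1 hz with hzx | hz
      · rw [hzx]
        exact (pvNotBefore_iff x y).1 (Bool.eq_false_iff.mpr hb)
      · exact h.1 z hz

lemma pvSorted2_eq (votes : List Int) :
    PySem.List.sorted2 votes (fun x => |x|) (fun x => x) false
      = votes.foldl (fun acc x => PySem.List.insertBy pvBefore x acc) [] := rfl

lemma pvFoldl_insertBy_pairwise : ∀ (l acc : List Int), acc.Pairwise pvRle →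
    (l.foldl (fun acc x => PySem.List.insertBy pvBefore x acc) acc).Pairwise pvRle
  | [], _, h => h
  | x :: l, acc, h => pvFoldl_insertBy_pairwise l _ (pvInsertBy_pairwise x acc h)

lemma pvSorted2_pairwise (votes : List Int) :
    (PySem.List.sorted2 votes (fun x => |x|) (fun x => x) false).Pairwise pvRle := by
  rw [pvSorted2_eq]
  exact pvFoldl_insertBy_pairwise votes [] List.Pairwise.nil

lemma pvRle_absle {a b : Int} (h : pvRle a b) : |a| ≤ |b| :=
  h.elim le_of_lt (fun h' => le_of_eq h'.1)

-- one-step unfolding of the run pass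
lemma pvRuns_cons (n x : Int) (xs : List Int) :
    pvRuns n (x :: xs) =
      (if 1 < 1 + (((xs.takeWhile (fun y => y == x)).length : Int)) ∧ |x| ≤ n then [|x|] else [])
        ++ pvRuns n (xs.dropWhile (fun y => y == x)) := by
  rw [pvRuns]

-- every element of pvRuns n s is |y| for some y ∈ s
lemma pvRuns_mem (n : Int) : ∀ (s : List Int), ∀ z ∈ pvRuns n s, ∃ y ∈ s, z = |y|
  | [] => by simp [pvRuns]
  | x :: xs => by
    intro z hz
    rw [pvRuns_cons] at hz
    rcases List.mem_append.1 hz with h1 | h1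
    · refine ⟨x, List.mem_cons_self .., ?_⟩
      split at h1 <;> simp_all
    · obtain ⟨y, hy, rfl⟩ := pvRuns_mem n (xs.dropWhile (fun y => y == x)) z h1
      exact ⟨y, List.mem_cons_of_mem _ ((List.dropWhile_sublist _).subset hy), rfl⟩
termination_by s => s.length
decreasing_by exact Nat.lt_succ_of_le (List.length_dropWhile_le _ _)

-- the output of the run pass is ascending
lemma pvRuns_pairwise (n : Int) : ∀ (s : List Int), s.Pairwise pvRle →
    (pvRuns n s).Pairwise (fun a b => a ≤ b)
  | [] => by intro _; simp [pvRuns]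
  | x :: xs => by
    intro h
    rw [pvRuns_cons]
    have hhead := (List.pairwise_cons.1 h).1
    have hxs := (List.pairwise_cons.1 h).2
    have hrest : (xs.dropWhile (fun y => y == x)).Pairwise pvRle :=
      List.Pairwise.sublist (List.dropWhile_sublist _) hxs
    have ih := pvRuns_pairwise n _ hrest
    rw [List.pairwise_append]
    refine ⟨by split <;> simp, ih, ?_⟩
    intro a ha b hb
    have ha' : a = |x| := by split at ha <;> simp_all
    obtain ⟨y, hy, rfl⟩ := pvRuns_mem n _ b hb
    have hyx : y ∈ xs := (List.dropWhile_sublist _).subset hy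
    rw [ha']
    exact pvRle_absle (hhead y hyx)
termination_by s => s.length
decreasing_by exact Nat.lt_succ_of_le (List.length_dropWhile_le _ _)

-- the run pass is a permutation of the filtered dedup image
lemma pvRuns_perm (n : Int) : ∀ (s : List Int), s.Pairwise pvRle →
    (pvRuns n s).Perm
      (((PySem.Set.ofList s).filter
          (fun k => decide (1 < (s.count k : Int) ∧ |k| ≤ n))).map (fun k => |k|))
  | [] => by intro _; simp [pvRuns, PySem.Set.ofList]
  | x :: xs => by
    intro h
    have hhead := (List.pairwise_cons.1 h).1
    have hxs := (List.pairwise_cons.1 h).2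
    have hrest : (xs.dropWhile (fun y => y == x)).Pairwise pvRle :=
      List.Pairwise.sublist (List.dropWhile_sublist _) hxs
    have hsplit : xs.takeWhile (fun y => y == x) ++ xs.dropWhile (fun y => y == x) = xs :=
      List.takeWhile_append_dropWhile
    have hsm_all : ∀ y ∈ xs.takeWhile (fun y => y == x), y = x := by
      intro y hy
      have := List.mem_takeWhile_imp hy
      simpa using this
    have hxrs : x ∉ xs.dropWhile (fun y => y == x) := by
      intro hx
      rcases hrs' : xs.dropWhile (fun y => y == x) with _ | ⟨r, rs'⟩
      · rw [hrs'] at hx; simp at hx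
      · have hrne : (r == x) = false := by
          have h2 := List.head?_dropWhile_not (fun y => y == x) xs
          rw [hrs'] at h2
          simpa using h2
        rw [hrs'] at hx
        rcases List.mem_cons.1 hx with heq | hx'
        · rw [heq] at hrne; simp at hrne
        · have hp : (r :: rs').Pairwise pvRle := hrs' ▸ hrest
          have hrx : pvRle r x := (List.pairwise_cons.1 hp).1 x hx'
          have hrxs : r ∈ xs := (List.dropWhile_sublist _).subset (hrs' ▸ List.mem_cons_self ..)
          have hxr : pvRle x r := hhead r hrxs
          have : x = r := pvRle_antisymm hxr hrx
          rw [this] at hrne; simp at hrne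
    have hcx : (x :: xs).count x = 1 + (xs.takeWhile (fun y => y == x)).length := by
      rw [List.count_cons_self]
      conv_lhs => rw [← hsplit]
      rw [List.count_append]
      have h1 : (xs.takeWhile (fun y => y == x)).count x
          = (xs.takeWhile (fun y => y == x)).length :=
        List.count_eq_length.2 (fun y hy => (hsm_all y hy).symm)
      have h2 : (xs.dropWhile (fun y => y == x)).count x = 0 := List.count_eq_zero.2 hxrs
      omega
    have hck : ∀ k, k ≠ x → (x :: xs).count k = (xs.dropWhile (fun y => y == x)).count k := by
      intro k hk
      rw [List.count_cons_of_ne (Ne.symm hk)]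
      conv_lhs => rw [← hsplit]
      rw [List.count_append]
      have h1 : (xs.takeWhile (fun y => y == x)).count k = 0 :=
        List.count_eq_zero.2 (fun hmem => hk (hsm_all k hmem))
      omega
    have hset : (PySem.Set.ofList (x :: xs)).Perm
        (x :: PySem.Set.ofList (xs.dropWhile (fun y => y == x))) := by
      rw [List.perm_ext_iff_of_nodup (PySem.Set.nodup_ofList _)
        (List.nodup_cons.2 ⟨fun hx => hxrs ((PySem.Set.mem_ofList _ _).1 hx),
          PySem.Set.nodup_ofList _⟩)]
      intro a
      rw [PySem.Set.mem_ofList, List.mem_cons, List.mem_cons, PySem.Set.mem_ofList]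
      conv_lhs => rw [← hsplit]
      rw [List.mem_append]
      constructor
      · rintro (rfl | hm | hm)
        · exact Or.inl rfl
        · exact Or.inl (hsm_all a hm)
        · exact Or.inr hm
      · rintro (rfl | hm)
        · exact Or.inl rfl
        · exact Or.inr (Or.inr hm)
    rw [pvRuns_cons]
    refine List.Perm.trans ?_ (((hset.filter _).map _).symm)
    rw [List.filter_cons]
    have hcast : (((x :: xs).count x : Int))
        = 1 + (((xs.takeWhile (fun y => y == x)).length : Int)) := by
      rw [hcx]; push_cast; ring
    have hfc : (PySem.Set.ofList (xs.dropWhile (fun y => y == x))).filter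
          (fun k => decide (1 < (((x :: xs).count k : Int)) ∧ |k| ≤ n))
        = (PySem.Set.ofList (xs.dropWhile (fun y => y == x))).filter
          (fun k => decide (1 < (((xs.dropWhile (fun y => y == x)).count k : Int)) ∧ |k| ≤ n)) := by
      apply List.filter_congr
      intro k hk
      have hkrs : k ∈ xs.dropWhile (fun y => y == x) := (PySem.Set.mem_ofList _ _).1 hk
      have hkx : k ≠ x := fun he => hxrs (he ▸ hkrs)
      rw [hck k hkx]
    have ih := pvRuns_perm n (xs.dropWhile (fun y => y == x)) hrest
    by_cases hcnd : 1 < 1 + (((xs.takeWhile (fun y => y == x)).length : Int)) ∧ |x| ≤ n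
    · rw [if_pos hcnd, if_pos (by rw [hcast]; exact decide_eq_true hcnd)]
      rw [List.map_cons, hfc]
      exact (ih.cons _)
    · rw [if_neg hcnd, if_neg (by rw [hcast]; exact fun hc => hcnd (of_decide_eq_true hc)), hfc]
      simpa using ih
termination_by s => s.length
decreasing_by all_goals exact Nat.lt_succ_of_le (List.length_dropWhile_le _ _)

-- ===== VERDICT (by name: the statement is the Claim_ definition above) =====
theorem findCurrency_spec : Claim_equal_findCurrency := by
  unfold Claim_equal_findCurrency Spec_findCurrency
  intro votes _
  show findCurrency votes = findCurrency_alt votes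
  have hfun : (fun (d : PySem.Dict Int Int) (vote : Int) =>
      match d.get? vote with
      | some c => d.insert vote (c + 1)
      | none => d.insert vote 1)
      = fun (d : PySem.Dict Int Int) (vote : Int) => d.insert vote (d.getD vote 0 + 1) := by
    funext d v
    cases hg : d.get? v <;> simp [PySem.Dict.getD, hg]
  have hA : findCurrency votes
      = PySem.List.sorted
          (((PySem.Set.ofList votes).filter
              (fun k => decide (1 < (votes.count k : Int) ∧ |k| ≤ (votes.length : Int)))).map
            (fun k => |k|))
          (fun x => x) false := by
    unfold findCurrency
    dsimp only
    rw [hfun, PySem.Dict.foldl_insert_getD_add_one_eq_counter, PySem.Dict.items_counter]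
    rw [PySem.List.foldl_append_ite
      (p := fun dv : Int × Int => 1 < dv.2 ∧ |dv.1| ≤ (votes.length : Int))
      (f := fun dv : Int × Int => |dv.1|)]
    rw [List.filter_map, List.map_map]
    simp [Function.comp_def, Nat.one_lt_cast]
  rw [hA]
  unfold findCurrency_alt
  dsimp only
  have hsp := pvSorted2_pairwise votes
  have hperm1 : (PySem.List.sorted2 votes (fun x => |x|) (fun x => x) false).Perm votes :=
    PySem.List.sorted2_perm votes _ _ false
  have hperm2 := pvRuns_perm (votes.length : Int) _ hsp
  have hqeq : (fun k => decide
        (1 < (((PySem.List.sorted2 votes (fun x => |x|) (fun x => x) false).count k : Int))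
          ∧ |k| ≤ (votes.length : Int)))
      = (fun k => decide (1 < ((votes.count k : Int)) ∧ |k| ≤ (votes.length : Int))) := by
    funext k
    rw [hperm1.count_eq k]
  have hsetp : (PySem.Set.ofList (PySem.List.sorted2 votes (fun x => |x|) (fun x => x) false)).Perm
      (PySem.Set.ofList votes) := by
    rw [List.perm_ext_iff_of_nodup (PySem.Set.nodup_ofList _) (PySem.Set.nodup_ofList _)]
    intro a
    rw [PySem.Set.mem_ofList, PySem.Set.mem_ofList]
    exact hperm1.mem_iff
  have hBperm : (pvRuns (votes.length : Int)
        (PySem.List.sorted2 votes (fun x => |x|) (fun x => x) false)).Perm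
      (((PySem.Set.ofList votes).filter
          (fun k => decide (1 < (votes.count k : Int) ∧ |k| ≤ (votes.length : Int)))).map
        (fun k => |k|)) := by
    refine hperm2.trans ?_
    rw [hqeq]
    exact (hsetp.filter _).map _
  have hBpw := pvRuns_pairwise (votes.length : Int) _ hsp
  exact PySem.List.sorted_id_eq_of_perm_of_pairwise _ _ hBperm hBpw
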